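-- pv_equiv track=rewrite | github.com/ecomsense/kite-socket | kite_socket/symbols.py | mk_opt_sym
-- ===== SOURCE A (Python) =====
-- diff = {"BANKNIFTY": 100, "NIFTY": 50}
--
-- def mk_opt_sym(symbol: str, expiry: str, strike: int, depth: int):
--     """
--     input:
--         symbol : the first part of option
--         expiry : str ex: 24507
--         strike : strike price
--         depth : number of strikes ex: 10 means 10 calls and 10 puts above
--             and below atm total 22 strikes including atm strike
--     ouput:
--     """
--     lst = []
--     lst.append("NFO:" + symbol + expiry + str(strike) + "CE")
--     lst.append("NFO:" + symbol + expiry + str(strike) + "PE")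
--     for v in range(1, depth):
--         lst.append("NFO:" + symbol + expiry + str(strike + v * diff[symbol]) + "CE")
--         lst.append("NFO:" + symbol + expiry + str(strike + v * diff[symbol]) + "PE")
--         lst.append("NFO:" + symbol + expiry + str(strike - v * diff[symbol]) + "CE")
--         lst.append("NFO:" + symbol + expiry + str(strike - v * diff[symbol]) + "PE")
--     return lst
-- ===== SOURCE B (Python) =====
-- diff = {"BANKNIFTY": 100, "NIFTY": 50}
--
-- def mk_opt_sym(symbol: str, expiry: str, strike: int, depth: int):
--     strikes = [strike]
--     for v in range(1, depth):
--         step = v * diff[symbol]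
--         strikes += [strike + step, strike - step]
--     prefix = "NFO:" + symbol + expiry
--     return [prefix + str(s) + t for s in strikes for t in ("CE", "PE")]
-- ===== Notes on version B (the rewrite author's own statement) =====
-- stated objective: simpler
-- what changed: B separates the work into two passes: it first builds the ordered list of strike prices (ATM, then +v/-v steps), then formats every symbol string with a single nested comprehension over a precomputed prefix, instead of A's one loop appending four hand-built strings per iteration.
import Mathlib
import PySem

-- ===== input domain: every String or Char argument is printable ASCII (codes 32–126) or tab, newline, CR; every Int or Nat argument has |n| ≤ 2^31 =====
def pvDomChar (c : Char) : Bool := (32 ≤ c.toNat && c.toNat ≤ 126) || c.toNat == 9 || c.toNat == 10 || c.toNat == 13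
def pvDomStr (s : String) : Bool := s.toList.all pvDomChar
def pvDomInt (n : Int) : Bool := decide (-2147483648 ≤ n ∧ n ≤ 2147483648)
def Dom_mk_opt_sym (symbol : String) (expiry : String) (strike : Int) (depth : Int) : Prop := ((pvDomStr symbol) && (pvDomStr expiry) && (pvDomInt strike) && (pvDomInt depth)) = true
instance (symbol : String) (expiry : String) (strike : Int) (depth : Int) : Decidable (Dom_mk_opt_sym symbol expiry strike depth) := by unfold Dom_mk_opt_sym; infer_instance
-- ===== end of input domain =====

-- B splits the work into two passes — build the strike-price list, then format all symbols
-- with one nested comprehension over a precomputed prefix — instead of A's single loop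
-- appending four hand-built strings per iteration (objective: simpler).

-- ===== PORT A =====
-- module-level constant: diff = {"BANKNIFTY": 100, "NIFTY": 50}
def pvDiffDict : PySem.Dict String Int :=
  PySem.Dict.ofList [("BANKNIFTY", 100), ("NIFTY", 50)]

-- diff[symbol]; the KeyError case (symbol absent, reached only when depth > 1) is
-- excluded by Pre_mk_opt_sym, so the default 0 is never observed under the claim.
def pvDiffAt (symbol : String) : Int := (PySem.Dict.get? pvDiffDict symbol).getD 0

def mk_opt_sym (symbol : String) (expiry : String) (strike : Int) (depth : Int) : List String :=
  let lst : List String := []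
  let lst := lst ++ ["NFO:" ++ symbol ++ expiry ++ PySem.Int.toStr strike ++ "CE"]
  let lst := lst ++ ["NFO:" ++ symbol ++ expiry ++ PySem.Int.toStr strike ++ "PE"]
  (PySem.List.pyRange 1 depth 1).foldl (fun lst v =>
    lst ++ ["NFO:" ++ symbol ++ expiry ++ PySem.Int.toStr (strike + v * pvDiffAt symbol) ++ "CE",
            "NFO:" ++ symbol ++ expiry ++ PySem.Int.toStr (strike + v * pvDiffAt symbol) ++ "PE",
            "NFO:" ++ symbol ++ expiry ++ PySem.Int.toStr (strike - v * pvDiffAt symbol) ++ "CE",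
            "NFO:" ++ symbol ++ expiry ++ PySem.Int.toStr (strike - v * pvDiffAt symbol) ++ "PE"]) lst

-- ===== PORT B =====
def mk_opt_sym_alt (symbol : String) (expiry : String) (strike : Int) (depth : Int) : List String :=
  let strikes : List Int := (PySem.List.pyRange 1 depth 1).foldl (fun acc v =>
    let step := v * pvDiffAt symbol
    acc ++ [strike + step, strike - step]) [strike]
  let pre := "NFO:" ++ symbol ++ expiry
  strikes.flatMap (fun s => ["CE", "PE"].map (fun t => pre ++ PySem.Int.toStr s ++ t))

-- ===== PRECONDITION & SPEC =====
-- Pre_ excludes exactly the inputs where A raises KeyError: an unknown symbol with depth > 1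
-- (the diff lookup is only reached from the second strike on).
def Pre_mk_opt_sym (symbol : String) (expiry : String) (strike : Int) (depth : Int) : Prop :=
  depth ≤ 1 ∨ symbol = "BANKNIFTY" ∨ symbol = "NIFTY"
instance (symbol : String) (expiry : String) (strike : Int) (depth : Int) : Decidable (Pre_mk_opt_sym symbol expiry strike depth) := by unfold Pre_mk_opt_sym; infer_instance

def pvWitness_mk_opt_sym : String × String × Int × Int := ("NIFTY", "24507", 22000, 3)

def Spec_mk_opt_sym (symbol : String) (expiry : String) (strike : Int) (depth : Int) (out : List String) : Prop := out = mk_opt_sym_alt symbol expiry strike depth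
instance (symbol : String) (expiry : String) (strike : Int) (depth : Int) (out : List String) : Decidable (Spec_mk_opt_sym symbol expiry strike depth out) := by unfold Spec_mk_opt_sym; infer_instance

-- ===== CLAIM (what is proved, stated in full; the proofs are below) =====
def Claim_equal_mk_opt_sym : Prop := ∀ (symbol : String) (expiry : String) (strike : Int) (depth : Int), Dom_mk_opt_sym symbol expiry strike depth → Pre_mk_opt_sym symbol expiry strike depth → Spec_mk_opt_sym symbol expiry strike depth (mk_opt_sym symbol expiry strike depth)

-- ===== LEMMAS AND PROOFS =====

-- A's four-appends-per-step fold over an expanded accumulator equals the expansion (flatMap E)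
-- of B's two-strikes-per-step fold.
theorem pv_foldl_flatMap (E : Int → List String) (p m : Int → Int) :
    ∀ (L : List Int) (acc : List Int),
      L.foldl (fun lst v => lst ++ (E (p v) ++ E (m v))) (acc.flatMap E)
        = (L.foldl (fun a v => a ++ [p v, m v]) acc).flatMap E := by
  intro L
  induction L with
  | nil => intro acc; rfl
  | cons v t ih =>
    intro acc
    simp only [List.foldl_cons]
    have h : acc.flatMap E ++ (E (p v) ++ E (m v)) = (acc ++ [p v, m v]).flatMap E := by
      simp [List.flatMap_append]
    rw [h, ih]

-- ===== VERDICT (by name: the statement is the Claim_ definition above) =====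
theorem mk_opt_sym_spec : Claim_equal_mk_opt_sym := by
  intro symbol expiry strike depth _ _
  unfold Spec_mk_opt_sym mk_opt_sym mk_opt_sym_alt
  have hE :
      (fun s => ["CE", "PE"].map
          (fun t => ("NFO:" ++ symbol ++ expiry) ++ PySem.Int.toStr s ++ t))
        = (fun s => ["NFO:" ++ symbol ++ expiry ++ PySem.Int.toStr s ++ "CE",
                     "NFO:" ++ symbol ++ expiry ++ PySem.Int.toStr s ++ "PE"]) := by
    funext s
    simp [List.map, String.append_assoc]
  simp only [List.nil_append, hE]
  have := pv_foldl_flatMap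
    (fun s => ["NFO:" ++ symbol ++ expiry ++ PySem.Int.toStr s ++ "CE",
               "NFO:" ++ symbol ++ expiry ++ PySem.Int.toStr s ++ "PE"])
    (fun v => strike + v * pvDiffAt symbol)
    (fun v => strike - v * pvDiffAt symbol)
    (PySem.List.pyRange 1 depth 1) [strike]
  simpa using this
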